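-- pv_equiv track=rewrite | github.com/Ritanlisa/Nanite-Tokenizers | rag/document_docx.py | _render_tabular_lines_to_markdown
-- ===== SOURCE A (Python) =====
-- from typing import Any, Dict, List, Optional
--
-- def _render_tabular_lines_to_markdown(text: str) -> str:
--     lines = str(text or "").splitlines()
--     out: List[str] = []
--     i = 0
--     while i < len(lines):
--         line = lines[i]
--         cells = [cell.strip() for cell in line.split("\t") if cell.strip()]
--         if len(cells) >= 2:
--             table_rows: List[List[str]] = [cells]
--             i += 1
--             while i < len(lines):
--                 next_cells = [cell.strip() for cell in lines[i].split("\t") if cell.strip()]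
--                 if len(next_cells) >= 2:
--                     table_rows.append(next_cells)
--                     i += 1
--                 else:
--                     break
--
--             width = max(len(row) for row in table_rows)
--             norm = [row + [""] * (width - len(row)) for row in table_rows]
--             header = "| " + " | ".join(cell.replace("|", "\\|") for cell in norm[0]) + " |"
--             sep = "| " + " | ".join(["---"] * width) + " |"
--             out.append(header)
--             out.append(sep)
--             for row in norm[1:]:
--                 out.append("| " + " | ".join(cell.replace("|", "\\|") for cell in row) + " |")
--             continue
--
--         out.append(line)
--         i += 1
--     return "\n".join(out)
-- ===== SOURCE B (Python) =====
-- from typing import List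
--
--
-- def _render_table(rows: "List[List[str]]") -> "List[str]":
--     width = max(len(r) for r in rows)
--     norm = [r + [""] * (width - len(r)) for r in rows]
--     md = ["| " + " | ".join(c.replace("|", "\\|") for c in r) + " |" for r in norm]
--     sep = "| " + " | ".join(["---"] * width) + " |"
--     return md[:1] + [sep] + md[1:]
--
--
-- def _render_tabular_lines_to_markdown(text: str) -> str:
--     # Single pass over the lines in REVERSE, building the output back-to-front.
--     # `pending` holds the cell rows of the table run that starts immediately
--     # after the current position; it is flushed when a non-table line is met.
--     out: List[str] = []
--     pending: List[List[str]] = []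
--     for raw in reversed(str(text or "").splitlines()):
--         cells = [c.strip() for c in raw.split("\t") if c.strip()]
--         if len(cells) >= 2:
--             pending = [cells] + pending
--         else:
--             if pending:
--                 out = _render_table(pending) + out
--                 pending = []
--             out = [raw] + out
--     if pending:
--         out = _render_table(pending) + out
--     return "\n".join(out)
-- ===== Notes on version B (the rewrite author's own statement) =====
-- stated objective: alternative
-- what changed: A's forward index walk with a nested inner while that collects each table run is replaced by a single reverse pass that builds the output back-to-front, carrying the pending table rows as an accumulator and flushing them when a non-table line (or the start of text) is reached.
import Mathlib
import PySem

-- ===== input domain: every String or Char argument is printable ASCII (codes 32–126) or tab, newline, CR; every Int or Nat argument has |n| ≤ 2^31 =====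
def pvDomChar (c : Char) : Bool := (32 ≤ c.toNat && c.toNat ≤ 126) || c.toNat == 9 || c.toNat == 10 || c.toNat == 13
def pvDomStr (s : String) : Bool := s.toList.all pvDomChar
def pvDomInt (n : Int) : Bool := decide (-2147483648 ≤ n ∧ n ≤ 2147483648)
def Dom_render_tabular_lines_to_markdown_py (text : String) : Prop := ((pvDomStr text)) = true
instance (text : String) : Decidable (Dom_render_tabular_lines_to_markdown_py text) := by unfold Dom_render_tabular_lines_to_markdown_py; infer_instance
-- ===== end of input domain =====

-- B replaces A's forward index walk with a nested table-collecting sub-loop by a SINGLE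
-- REVERSE pass that builds the output back-to-front, carrying the pending table rows of the
-- run that starts just after the current line (objective: alternative decomposition; not faster).

-- ===== PORT A =====
-- cells = [cell.strip() for cell in line.split("\t") if cell.strip()]
-- the separator is the non-empty literal "\t", so split? never returns none
def pvCellsA (line : String) : List String :=
  ((((PySem.Str.split? line "\t").getD []).map PySem.Str.strip).filter (fun c => c != ""))

-- the inner 'while i < len(lines)' that appends table rows until a non-table line
def pvCollectA (lines : List String) (rows : List (List String)) :
    List (List String) × List String :=
  match lines with
  | [] => (rows, [])
  | l :: rest =>
    let cs := pvCellsA l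
    if cs.length ≥ 2 then pvCollectA rest (rows ++ [cs]) else (rows, l :: rest)

-- width / norm / header / sep / body block of A
def pvTableA : List (List String) → List String
  | [] => []
  | r0 :: rs =>
    let width := rs.foldl (fun a r => max a r.length) r0.length
    let pad : List String → List String := fun row => row ++ List.replicate (width - row.length) ""
    let render : List String → String := fun row =>
      "| " ++ PySem.Str.join " | " (row.map (fun c => PySem.Str.replace c "|" "\\|")) ++ " |"
    render (pad r0) ::
      ("| " ++ PySem.Str.join " | " (List.replicate width "---") ++ " |") ::
      rs.map (fun r => render (pad r))

theorem pvCollectA_len (lines : List String) (rows : List (List String)) :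
    (pvCollectA lines rows).2.length ≤ lines.length := by
  induction lines generalizing rows with
  | nil => simp [pvCollectA]
  | cons l rest ih =>
    simp only [pvCollectA]
    split
    · exact Nat.le_succ_of_le (ih _)
    · simp

-- the outer 'while i < len(lines)' of A
def pvLoopA (lines : List String) : List String :=
  match lines with
  | [] => []
  | l :: rest =>
    let cs := pvCellsA l
    if cs.length ≥ 2 then
      pvTableA (pvCollectA rest [cs]).1 ++ pvLoopA (pvCollectA rest [cs]).2
    else l :: pvLoopA rest
termination_by lines.length
decreasing_by
  · exact Nat.lt_succ_of_le (pvCollectA_len rest [cs])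
  · simp

-- `str(text or "")` is the identity on a str argument (str("") = "")
def render_tabular_lines_to_markdown_py (text : String) : String :=
  PySem.Str.join "\n" (pvLoopA (PySem.Str.splitlines text))

-- ===== PORT B =====
-- same cell extraction; the separator "\t" is non-empty, so split? never returns none
def pvCellsB (line : String) : List String :=
  ((((PySem.Str.split? line "\t").getD []).map PySem.Str.strip).filter (fun c => c != ""))

-- _render_table: width / norm / md rows, separator spliced in after the header
def pvTableB (rows : List (List String)) : List String :=
  let width := rows.foldl (fun a r => max a r.length) 0
  let norm := rows.map (fun r => r ++ List.replicate (width - r.length) "")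
  let md := norm.map (fun r =>
    "| " ++ PySem.Str.join " | " (r.map (fun c => PySem.Str.replace c "|" "\\|")) ++ " |")
  md.take 1 ++ ["| " ++ PySem.Str.join " | " (List.replicate width "---") ++ " |"] ++ md.drop 1

-- one step of the reverse loop: state = (pending table rows, output so far)
def pvStepB (raw : String) (st : List (List String) × List String) :
    List (List String) × List String :=
  let cells := pvCellsB raw
  if cells.length ≥ 2 then ([cells] ++ st.1, st.2)
  else ([], raw :: (if st.1 = [] then st.2 else pvTableB st.1 ++ st.2))

def render_tabular_lines_to_markdown_py_alt (text : String) : String :=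
  let st := (PySem.Str.splitlines text).foldr pvStepB ([], [])
  PySem.Str.join "\n" (if st.1 = [] then st.2 else pvTableB st.1 ++ st.2)

-- ===== PRECONDITION & SPEC =====
def Spec_render_tabular_lines_to_markdown_py (text : String) (out : String) : Prop := out = render_tabular_lines_to_markdown_py_alt text
instance (text : String) (out : String) : Decidable (Spec_render_tabular_lines_to_markdown_py text out) := by unfold Spec_render_tabular_lines_to_markdown_py; infer_instance

-- ===== CLAIM (what is proved, stated in full; the proofs are below) =====
def Claim_equal_render_tabular_lines_to_markdown_py : Prop := ∀ (text : String), Dom_render_tabular_lines_to_markdown_py text → Spec_render_tabular_lines_to_markdown_py text (render_tabular_lines_to_markdown_py text)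

-- ===== LEMMAS AND PROOFS =====

theorem pvCellsB_eq : pvCellsB = pvCellsA := rfl

-- is_table test, shared vocabulary of the proofs
def pvIsTab (l : String) : Bool := decide ((pvCellsA l).length ≥ 2)

theorem pvTableB_eq_A (rows : List (List String)) (h : rows ≠ []) :
    pvTableB rows = pvTableA rows := by
  match rows with
  | [] => exact absurd rfl h
  | r0 :: rs => simp [pvTableB, pvTableA, Nat.zero_max]

theorem pvCollectA_eq (lines : List String) (rows : List (List String)) :
    pvCollectA lines rows =
      (rows ++ (lines.takeWhile pvIsTab).map pvCellsA, lines.dropWhile pvIsTab) := by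
  induction lines generalizing rows with
  | nil => simp [pvCollectA]
  | cons l rest ih =>
    by_cases h : (pvCellsA l).length ≥ 2
    · simp [pvCollectA, h, pvIsTab, ih]
    · simp [pvCollectA, h, pvIsTab]

-- pvLoopA expressed through its leading table run
theorem pvLoopA_run (lines : List String) :
    pvLoopA lines =
      (if (lines.takeWhile pvIsTab).map pvCellsA = [] then pvLoopA (lines.dropWhile pvIsTab)
       else pvTableA ((lines.takeWhile pvIsTab).map pvCellsA) ++ pvLoopA (lines.dropWhile pvIsTab)) := by
  match lines with
  | [] => simp
  | l :: rest =>
    by_cases h : (pvCellsA l).length ≥ 2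
    · have ht : pvIsTab l = true := by simp [pvIsTab, h]
      rw [pvLoopA]
      simp [h, ht, pvCollectA_eq]
    · have hf : pvIsTab l = false := by simp [pvIsTab, h]
      simp [hf]

-- the reverse fold of B computes A's pending run and A's rendering of the rest
theorem pvMain (lines : List String) :
    lines.foldr pvStepB ([], []) =
      ((lines.takeWhile pvIsTab).map pvCellsA, pvLoopA (lines.dropWhile pvIsTab)) := by
  induction lines with
  | nil => simp [pvLoopA]
  | cons l rest ih =>
    rw [List.foldr_cons, ih]
    by_cases h : (pvCellsA l).length ≥ 2
    · have ht : pvIsTab l = true := by simp [pvIsTab, h]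
      simp [pvStepB, ht, pvCellsB_eq]
      omega
    · have hf : pvIsTab l = false := by simp [pvIsTab, h]
      have hB : ¬ (pvCellsB l).length ≥ 2 := h
      simp only [pvStepB, if_neg hB, List.takeWhile_cons, List.dropWhile_cons, hf,
        Bool.false_eq_true, if_false, List.map_nil]
      refine Prod.ext rfl ?_
      rw [pvLoopA]
      simp only [h, if_false]
      rw [pvLoopA_run rest]
      by_cases hT : (rest.takeWhile pvIsTab).map pvCellsA = []
      · simp [hT]
      · simp [hT, pvTableB_eq_A _ hT]

-- ===== VERDICT (by name: the statement is the Claim_ definition above) =====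
theorem render_tabular_lines_to_markdown_py_spec : Claim_equal_render_tabular_lines_to_markdown_py := by
  intro text _
  unfold Spec_render_tabular_lines_to_markdown_py
  unfold render_tabular_lines_to_markdown_py render_tabular_lines_to_markdown_py_alt
  rw [pvMain]
  rw [pvLoopA_run (PySem.Str.splitlines text)]
  by_cases hT : ((PySem.Str.splitlines text).takeWhile pvIsTab).map pvCellsA = []
  · simp [hT]
  · simp [hT, pvTableB_eq_A _ hT]
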